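-- pv_equiv track=rewrite | github.com/alswo1212/jungle_baekjoon | 프로그래머스/3/152995. 인사고과/인사고과.py | solution
-- ===== SOURCE A (Python) =====
-- def solution(scores):
--     n = len(scores)
--     people = [(scores[i][0], scores[i][1], i) for i in range(n)]
--     people.sort(key=lambda p : (-p[0], p[1]))
--     filterd = []
--     max_val1, max_val2 = people[0][0], people[0][1]
--     wanho = 0
--     for p in people:
--         if p[0] < max_val1 and p[1] < max_val2:
--             continue
--         if p[0] > max_val1 or p[1] > max_val2:
--             max_val1, max_val2 = p[0], p[1]
--         filterd.append((p[0]+p[1], p[2]))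
--         if p[2] == 0:
--             wanho = p[0] + p[1]
--     filterd.sort(reverse=True)
--
--     cnt = 0
--     for i in range(len(filterd)):
--         score, id = filterd[i][0], filterd[i][1]
--         if wanho < score:
--             cnt += 1
--         if id == 0:
--             return cnt + 1
--
--     return -1
-- ===== SOURCE B (Python) =====
-- def solution(scores):
--     people = sorted([(row[0], row[1], i) for i, row in enumerate(scores)],
--                     key=lambda p: (-p[0], p[1]))
--     m1, m2 = people[0][0], people[0][1]
--     sums = []
--     wanho = None
--     for a, b, i in people:
--         if a < m1 and b < m2:
--             continue
--         if a > m1 or b > m2: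
--             m1, m2 = a, b
--         sums.append(a + b)
--         if i == 0:
--             wanho = a + b
--     if wanho is None:
--         return -1
--     return 1 + sum(1 for s in sums if s > wanho)
-- ===== Notes on version B (the rewrite author's own statement) =====
-- stated objective: simpler
-- what changed: B keeps the sort + domination filter but deletes the second sort and the positional early-return scan, tracking Wanho's total with a found-flag during the filter and returning 1 plus an order-independent count of filtered totals strictly greater than it (or -1 if Wanho was eliminated).
import Mathlib
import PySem

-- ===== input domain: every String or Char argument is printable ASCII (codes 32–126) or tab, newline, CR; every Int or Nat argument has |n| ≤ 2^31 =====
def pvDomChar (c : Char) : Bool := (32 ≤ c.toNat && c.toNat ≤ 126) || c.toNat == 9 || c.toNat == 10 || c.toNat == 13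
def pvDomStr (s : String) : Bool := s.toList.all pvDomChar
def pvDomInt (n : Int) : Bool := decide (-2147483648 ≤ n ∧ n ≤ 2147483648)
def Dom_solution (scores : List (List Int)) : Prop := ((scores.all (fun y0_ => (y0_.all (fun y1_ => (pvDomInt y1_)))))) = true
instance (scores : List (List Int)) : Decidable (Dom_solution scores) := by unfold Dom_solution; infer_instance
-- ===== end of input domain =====

-- B deletes A's second sort and positional early-return scan, replacing them with a
-- found-flag and an order-independent count of filtered totals strictly greater than Wanho's.

-- ===== PORT A =====
-- loop body of A's filter loop (state = (max_val1, max_val2, filterd, wanho))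
def stepA (st : Int × Int × List (Int × Int) × Int) (p : Int × Int × Int) :
    Int × Int × List (Int × Int) × Int :=
  if p.1 < st.1 ∧ p.2.1 < st.2.1 then st
  else
    ((if p.1 > st.1 ∨ p.2.1 > st.2.1 then p.1 else st.1),
     (if p.1 > st.1 ∨ p.2.1 > st.2.1 then p.2.1 else st.2.1),
     st.2.2.1 ++ [(p.1 + p.2.1, p.2.2)],
     (if p.2.2 = 0 then p.1 + p.2.1 else st.2.2.2))

-- A's final loop over filterd, with its early return ('return cnt + 1' at id == 0, else -1)
def scanA (wanho : Int) : List (Int × Int) → Int → Int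
  | [], _ => -1
  | (score, id) :: rest, cnt =>
      let cnt' := if wanho < score then cnt + 1 else cnt
      if id = 0 then cnt' + 1 else scanA wanho rest cnt'

-- subscripts scores[i][0]/[1] and people[0] via pyGetD: exact on Pre_ (scores nonempty, rows of length ≥ 2)
def solution (scores : List (List Int)) : Int :=
  let n : Int := PySem.List.len scores
  let people0 := (PySem.List.pyRange 0 n).map (fun i =>
      (PySem.List.pyGetD (PySem.List.pyGetD scores i []) 0 0,
       PySem.List.pyGetD (PySem.List.pyGetD scores i []) 1 0, i))
  let people := PySem.List.sorted2 people0 (fun p => -p.1) (fun p => p.2.1)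
  let h := PySem.List.pyGetD people 0 (0, 0, 0)
  let st := people.foldl stepA (h.1, h.2.1, [], 0)
  let filterd := PySem.List.sorted2 st.2.2.1 (fun q => q.1) (fun q => q.2) true
  scanA st.2.2.2 filterd 0

-- ===== PORT B =====
-- loop body of B's filter loop (state = (m1, m2, sums, wanho : Option))
def stepB (st : Int × Int × List Int × Option Int) (p : Int × Int × Int) :
    Int × Int × List Int × Option Int :=
  if p.1 < st.1 ∧ p.2.1 < st.2.1 then st
  else
    ((if p.1 > st.1 ∨ p.2.1 > st.2.1 then p.1 else st.1),
     (if p.1 > st.1 ∨ p.2.1 > st.2.1 then p.2.1 else st.2.1),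
     st.2.2.1 ++ [p.1 + p.2.1],
     (if p.2.2 = 0 then some (p.1 + p.2.1) else st.2.2.2))

-- subscripts row[0]/row[1] and people[0] via pyGetD: exact on Pre_ (scores nonempty, rows of length ≥ 2)
def solution_alt (scores : List (List Int)) : Int :=
  let people0 := (PySem.List.enumerate scores).map (fun pr =>
      (PySem.List.pyGetD pr.2 0 0, PySem.List.pyGetD pr.2 1 0, pr.1))
  let people := PySem.List.sorted2 people0 (fun p => -p.1) (fun p => p.2.1)
  let h := PySem.List.pyGetD people 0 (0, 0, 0)
  let st := people.foldl stepB (h.1, h.2.1, [], none)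
  match st.2.2.2 with
  | none => -1
  | some w => 1 + (st.2.2.1.countP (fun s => w < s) : Int)

-- ===== PRECONDITION & SPEC =====
-- exactly the inputs on which Python A returns: people[0] needs a nonempty list,
-- scores[i][0]/scores[i][1] need every row to have at least two entries
def Pre_solution (scores : List (List Int)) : Prop :=
  scores ≠ [] ∧ ∀ row ∈ scores, 2 ≤ row.length
instance (scores : List (List Int)) : Decidable (Pre_solution scores) := by
  unfold Pre_solution; infer_instance
def pvWitness_solution : List (List Int) := [[1, 1]]

def Spec_solution (scores : List (List Int)) (out : Int) : Prop := out = solution_alt scores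
instance (scores : List (List Int)) (out : Int) : Decidable (Spec_solution scores out) := by
  unfold Spec_solution; infer_instance

-- ===== CLAIM (what is proved, stated in full; the proofs are below) =====
def Claim_equal_solution : Prop := ∀ (scores : List (List Int)), Dom_solution scores →
  Pre_solution scores → Spec_solution scores (solution scores)

-- ===== LEMMAS AND PROOFS =====

-- relation between A's and B's filter-loop states
def PVRel (sA : Int × Int × List (Int × Int) × Int) (sB : Int × Int × List Int × Option Int) : Prop :=
  sB.1 = sA.1 ∧ sB.2.1 = sA.2.1 ∧ sB.2.2.1 = sA.2.2.1.map (·.1) ∧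
  (sB.2.2.2 = none → ∀ q ∈ sA.2.2.1, q.2 ≠ 0) ∧
  (∀ v, sB.2.2.2 = some v → v = sA.2.2.2 ∧ (v, 0) ∈ sA.2.2.1 ∧
    ∀ q ∈ sA.2.2.1, q.2 = 0 → q.1 = v) ∧
  (∀ q ∈ sA.2.2.1, 0 ≤ q.2)

lemma count_step (sA : Int × Int × List (Int × Int) × Int) (p : Int × Int × Int) :
    (stepA sA p).2.2.1.countP (fun q => q.2 = 0)
      ≤ sA.2.2.1.countP (fun q => q.2 = 0) + (if p.2.2 = 0 then 1 else 0) := by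
  unfold stepA
  by_cases hc : p.1 < sA.1 ∧ p.2.1 < sA.2.1
  · by_cases hi : p.2.2 = 0 <;> simp [hc, hi]
  · by_cases hi : p.2.2 = 0 <;>
      simp [hc, hi, List.countP_append]

lemma rel_step (sA : Int × Int × List (Int × Int) × Int) (sB : Int × Int × List Int × Option Int)
    (p : Int × Int × Int) (hrel : PVRel sA sB)
    (h0 : p.2.2 = 0 → ∀ q ∈ sA.2.2.1, q.2 ≠ 0) (hp : 0 ≤ p.2.2) :
    PVRel (stepA sA p) (stepB sB p) := by
  obtain ⟨m1, m2, fl, w⟩ := sA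
  obtain ⟨b1, b2, sums, opt⟩ := sB
  obtain ⟨h1, h2, hmap, hnone, hsome, hpos⟩ := hrel
  simp only at h1 h2 hmap hnone hsome hpos h0 hp
  subst h1; subst h2; subst hmap
  unfold stepA stepB
  by_cases hc : p.1 < b1 ∧ p.2.1 < b2
  · simp only [hc]
    exact ⟨rfl, rfl, rfl, hnone, hsome, hpos⟩
  · simp only [hc, ite_false]
    refine ⟨rfl, rfl, by simp, ?_, ?_, ?_⟩
    · intro hn
      by_cases hi : p.2.2 = 0 <;> simp only [hi, ite_true, ite_false] at hn ⊢
      · exact absurd hn (by simp)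
      · intro q hq
        rcases List.mem_append.mp hq with hq | hq
        · exact hnone hn q hq
        · have hq' : q = (p.1 + p.2.1, p.2.2) := by simpa using hq
          rw [hq']; exact hi
    · intro v hv
      by_cases hi : p.2.2 = 0 <;> simp only [hi, ite_true, ite_false] at hv ⊢
      · -- appended the id-0 entry: v = p.1 + p.2.1, no previous zero
        have hv' : v = p.1 + p.2.1 := (Option.some_inj.mp hv).symm
        subst hv'
        refine ⟨rfl, List.mem_append.mpr (Or.inr (List.mem_cons_self)), ?_⟩
        intro q hq
        rcases List.mem_append.mp hq with hq | hq
        · exact fun hq0 => absurd hq0 (h0 hi q hq)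
        · have hq' : q = (p.1 + p.2.1, 0) := by simpa [hi] using hq
          rw [hq']; intro _; rfl
      · obtain ⟨hvw, hvm, hall⟩ := hsome v hv
        refine ⟨hvw, List.mem_append.mpr (Or.inl hvm), ?_⟩
        intro q hq
        rcases List.mem_append.mp hq with hq | hq
        · exact hall q hq
        · have hq' : q = (p.1 + p.2.1, p.2.2) := by simpa using hq
          rw [hq']; intro hbad; exact absurd hbad hi
    · intro q hq
      rcases List.mem_append.mp hq with hq | hq
      · exact hpos q hq
      · have hq' : q = (p.1 + p.2.1, p.2.2) := by simpa using hq
        rw [hq']; exact hp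

lemma rel_foldl (l : List (Int × Int × Int)) :
    ∀ sA sB, PVRel sA sB →
    sA.2.2.1.countP (fun q => q.2 = 0) + l.countP (fun p => p.2.2 = 0) ≤ 1 →
    (∀ p ∈ l, 0 ≤ p.2.2) →
    PVRel (l.foldl stepA sA) (l.foldl stepB sB) ∧
    (l.foldl stepA sA).2.2.1.countP (fun q => q.2 = 0) ≤ 1 := by
  induction l with
  | nil =>
    intro sA sB hrel hcnt _
    simp only [List.foldl_nil, List.countP_nil] at hcnt ⊢
    exact ⟨hrel, by omega⟩
  | cons p rest ih =>
    intro sA sB hrel hcnt hnn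
    simp only [List.countP_cons, List.foldl_cons] at hcnt ⊢
    have h0 : p.2.2 = 0 → ∀ q ∈ sA.2.2.1, q.2 ≠ 0 := by
      intro hp0
      have hz : sA.2.2.1.countP (fun q => q.2 = 0) = 0 := by
        simp only [hp0] at hcnt; simp at hcnt; omega
      intro q hq hq0
      have := List.countP_eq_zero.mp hz q hq
      simp [hq0] at this
    have hstep := rel_step sA sB p hrel h0 (hnn p (List.mem_cons_self))
    have hcs := count_step sA p
    refine ih _ _ hstep ?_ (fun q hq => hnn q (List.mem_cons_of_mem _ hq))
    by_cases hi : p.2.2 = 0 <;> simp [hi] at hcnt hcs ⊢ <;> omega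

-- sorted2 with Int keys is sorted with the lexicographic pair key
lemma sorted2_eq_sorted_lex {α : Type} (xs : List α) (k1 k2 : α → Int) (rev : Bool) :
    PySem.List.sorted2 xs k1 k2 rev
      = PySem.List.sorted xs (fun a => toLex (k1 a, k2 a)) rev := by
  have hpt : ∀ a b : α,
      (decide (k1 a < k1 b) || (!decide (k1 b < k1 a) && decide (k2 a < k2 b)))
        = decide (toLex (k1 a, k2 a) < toLex (k1 b, k2 b)) := by
    intro a b
    by_cases h1 : k1 a < k1 b <;> by_cases h2 : k1 b < k1 a <;>
      by_cases h3 : k2 a < k2 b <;>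
      simp [Prod.Lex.lt_iff, h1, h2, h3] <;> omega
  cases rev <;> simp only [PySem.List.sorted2, PySem.List.sorted, hpt]

lemma scan_none (w : Int) : ∀ (F : List (Int × Int)) (cnt : Int),
    (∀ q ∈ F, q.2 ≠ 0) → scanA w F cnt = -1 := by
  intro F
  induction F with
  | nil => intro cnt _; rfl
  | cons q rest ih =>
    intro cnt hz
    obtain ⟨s, i⟩ := q
    have hi : i ≠ 0 := hz (s, i) (List.mem_cons_self)
    simp only [scanA, hi, if_neg, not_false_iff]
    exact ih _ (fun q hq => hz q (List.mem_cons_of_mem _ hq))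

lemma scan_some (w : Int) : ∀ (F : List (Int × Int)) (cnt : Int),
    F.Pairwise (fun a b => b.1 < a.1 ∨ (b.1 = a.1 ∧ b.2 ≤ a.2)) →
    (w, 0) ∈ F → (∀ q ∈ F, q.2 = 0 → q.1 = w) → (∀ q ∈ F, 0 ≤ q.2) →
    scanA w F cnt = cnt + 1 + (F.countP (fun q => w < q.1) : Int) := by
  intro F
  induction F with
  | nil => intro cnt _ hmem _ _; simp at hmem
  | cons q rest ih =>
    intro cnt hpw hmem hz hnn
    obtain ⟨s, i⟩ := q
    obtain ⟨hhd, htl⟩ := List.pairwise_cons.mp hpw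
    by_cases hi : i = 0
    · subst hi
      have hs : s = w := hz (s, 0) (List.mem_cons_self) rfl
      have hcount : rest.countP (fun q => w < q.1) = 0 := by
        rw [List.countP_eq_zero]
        intro q hq
        rcases hhd q hq with hlt | ⟨heq, hle⟩
        · simp only [decide_eq_true_eq]
          simp only at hlt
          omega
        · have hq0 : q.2 = 0 := le_antisymm hle (hnn q (List.mem_cons_of_mem _ hq))
          have := hz q (List.mem_cons_of_mem _ hq) hq0
          simp only [decide_eq_true_eq]
          omega
      simp [scanA, hcount, hs]
    · have hmem' : (w, 0) ∈ rest := by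
        rcases List.mem_cons.mp hmem with hm | hm
        · exact absurd (congrArg Prod.snd hm).symm hi
        · exact hm
      have hrec := ih (if w < s then cnt + 1 else cnt) htl hmem'
        (fun q hq => hz q (List.mem_cons_of_mem _ hq))
        (fun q hq => hnn q (List.mem_cons_of_mem _ hq))
      simp only [scanA, hi, if_neg, not_false_iff]
      rw [hrec]
      simp only [List.countP_cons]
      by_cases hws : w < s <;> simp [hws] <;> omega

-- at most one element with third component 0 in a pairwise-distinct-index list
lemma countP_le_one_of_pairwise (l : List (Int × Int × Int))
    (h : l.Pairwise (fun p q => p.2.2 ≠ q.2.2)) :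
    l.countP (fun p => p.2.2 = 0) ≤ 1 := by
  induction l with
  | nil => simp
  | cons p t ih =>
    obtain ⟨hhd, htl⟩ := List.pairwise_cons.mp h
    simp only [List.countP_cons]
    by_cases hp : p.2.2 = 0
    · have hz : t.countP (fun q => q.2.2 = 0) = 0 := by
        rw [List.countP_eq_zero]
        intro q hq
        have := hhd q hq
        rw [hp] at this
        simp [Ne.symm this]
      simp [hz, hp]
    · have := ih htl
      simp [hp]; omega

-- the two ports build the same pre-sort candidate list
lemma pre_lists_eq (scores : List (List Int)) :
    (PySem.List.pyRange 0 (PySem.List.len scores)).map (fun i =>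
        (PySem.List.pyGetD (PySem.List.pyGetD scores i []) 0 0,
         PySem.List.pyGetD (PySem.List.pyGetD scores i []) 1 0, i))
      = (PySem.List.enumerate scores).map (fun pr =>
        (PySem.List.pyGetD pr.2 0 0, PySem.List.pyGetD pr.2 1 0, pr.1)) := by
  rw [PySem.List.enumerate_eq_map_pyRange scores [], List.map_map]
  rfl

lemma main_eq (scores : List (List Int)) : solution scores = solution_alt scores := by
  simp only [solution, solution_alt, pre_lists_eq]
  set l0 := (PySem.List.enumerate scores).map (fun pr =>
      (PySem.List.pyGetD pr.2 0 0, PySem.List.pyGetD pr.2 1 0, pr.1)) with hl0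
  set ppl := PySem.List.sorted2 l0 (fun p => -p.1) (fun p => p.2.1) with hppl
  set h := PySem.List.pyGetD ppl 0 (0, 0, 0) with hh
  have hperm : ppl.Perm l0 := PySem.List.sorted2_perm _ _ _ _
  -- at most one id-0 entry, all ids nonnegative
  have hpw : l0.Pairwise (fun p q => p.2.2 ≠ q.2.2) := by
    rw [hl0]
    refine List.Pairwise.map _ ?_ (PySem.List.pairwise_lt_enumerate scores 0)
    intro a b hab
    simp only
    omega
  have hcnt : ppl.countP (fun p => p.2.2 = 0) ≤ 1 := by
    rw [hperm.countP_eq]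
    exact countP_le_one_of_pairwise l0 hpw
  have hnn : ∀ p ∈ ppl, 0 ≤ p.2.2 := by
    intro p hp
    have hp0 : p ∈ l0 := hperm.mem_iff.mp hp
    rw [hl0] at hp0
    obtain ⟨pr, hpr, rfl⟩ := List.mem_map.mp hp0
    obtain ⟨k, hk, rfl⟩ := (PySem.List.mem_enumerate_iff scores 0 pr).mp hpr
    simp
  obtain ⟨hrel, -⟩ := rel_foldl ppl (h.1, h.2.1, [], 0) (h.1, h.2.1, [], none)
    ⟨rfl, rfl, rfl, fun _ q hq => absurd hq (List.not_mem_nil),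
     fun v hv => by simp at hv, fun q hq => absurd hq (List.not_mem_nil)⟩
    (by simpa using hcnt) hnn
  set sA := ppl.foldl stepA (h.1, h.2.1, [], 0) with hsA
  set sB := ppl.foldl stepB (h.1, h.2.1, [], none) with hsB
  obtain ⟨-, -, hmap, hnone, hsome, hpos⟩ := hrel
  have hperm2 : (PySem.List.sorted2 sA.2.2.1 (fun q => q.1) (fun q => q.2) true).Perm sA.2.2.1 :=
    PySem.List.sorted2_perm _ _ _ _
  cases hopt : sB.2.2.2 with
  | none =>
    rw [scan_none]
    intro q hq
    exact hnone hopt q (hperm2.mem_iff.mp hq)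
  | some v =>
    obtain ⟨hvw, hvm, hall⟩ := hsome v hopt
    subst hvw
    have hpw2 : (PySem.List.sorted2 sA.2.2.1 (fun q => q.1) (fun q => q.2) true).Pairwise
        (fun a b => b.1 < a.1 ∨ (b.1 = a.1 ∧ b.2 ≤ a.2)) := by
      rw [sorted2_eq_sorted_lex]
      refine (PySem.List.sorted_pairwise_rev _ _).imp ?_
      intro a b hab
      simpa [Prod.Lex.le_iff] using hab
    rw [scan_some sA.2.2.2 _ 0 hpw2 (hperm2.mem_iff.mpr hvm)
      (fun q hq => hall q (hperm2.mem_iff.mp hq))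
      (fun q hq => hpos q (hperm2.mem_iff.mp hq))]
    dsimp only
    rw [hperm2.countP_eq, hmap, List.countP_map]
    have hcomp : ((fun s => decide (sA.2.2.2 < s)) ∘ (fun q : Int × Int => q.1))
        = (fun q : Int × Int => decide (sA.2.2.2 < q.1)) := rfl
    rw [hcomp]
    omega

-- ===== VERDICT (by name: the statement is the Claim_ definition above) =====
theorem solution_spec : Claim_equal_solution := by
  intro scores _ _
  unfold Spec_solution
  exact main_eq scores
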